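-- pv_equiv track=rewrite | github.com/nhayato/ant-book | best_cow_line/best_cow_line/__init__.py | solve
-- ===== SOURCE A (Python) =====
-- def solve(N: int, S: str) -> str:
--     T = ""
--
--     while S != "":
--         rS = S[::-1]
--         if S[0] < rS[0]:
--             T += S[0]
--             S = S[1:]
--         else:
--             T += S[-1]
--             S = S[:-1]
--
--     return T
-- ===== SOURCE B (Python) =====
-- def solve(N: int, S: str) -> str:
--     out = []
--     i, j = 0, len(S) - 1
--     while i <= j:
--         if S[i] < S[j]:
--             out.append(S[i])
--             i += 1
--         else:
--             out.append(S[j])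
--             j -= 1
--     return "".join(out)
-- ===== Notes on version B (the rewrite author's own statement) =====
-- stated objective: faster
-- what changed: Replaced A's repeated string slicing/reversal (each iteration copies the remaining string) with a two-pointer scan over the fixed string, appending chosen chars to a list and joining once.
import Mathlib
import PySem

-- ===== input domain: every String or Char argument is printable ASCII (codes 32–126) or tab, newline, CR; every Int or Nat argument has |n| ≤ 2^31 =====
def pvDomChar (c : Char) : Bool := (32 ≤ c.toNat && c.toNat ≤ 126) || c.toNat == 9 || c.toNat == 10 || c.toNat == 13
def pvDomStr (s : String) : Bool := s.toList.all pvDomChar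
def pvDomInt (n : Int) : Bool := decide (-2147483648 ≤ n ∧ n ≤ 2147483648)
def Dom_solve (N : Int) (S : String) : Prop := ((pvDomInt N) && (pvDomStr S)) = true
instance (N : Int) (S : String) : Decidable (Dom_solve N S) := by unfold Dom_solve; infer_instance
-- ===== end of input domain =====

-- B replaces A's per-iteration string slicing/reversal with a two-pointer scan; return value only.
-- ===== PORT A =====
-- while S != "": compare S[0] with reversed S's first char (= S[-1]); take front or back.
def solveLoopA (S T : List Char) : List Char :=
  match S with
  | [] => T
  | c :: rest =>
      let rS := (c :: rest).reverse
      let last := rS.head (by simp [rS])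
      if c < last then solveLoopA rest (T ++ [c])
      else solveLoopA ((c :: rest).dropLast) (T ++ [last])
termination_by S.length
decreasing_by all_goals simp [List.length_dropLast]

def solve (N : Int) (S : String) : String := String.mk (solveLoopA S.toList [])

-- ===== PORT B =====
-- two pointers i ≤ j into the fixed list; append the smaller end char to the accumulator.
def solveLoopB (l : List Char) (i j : Int) (acc : List Char) : List Char :=
  if h : i ≤ j then
    let ci := l.getD i.toNat ' '
    let cj := l.getD j.toNat ' '
    if ci < cj then solveLoopB l (i + 1) j (acc ++ [ci])
    else solveLoopB l i (j - 1) (acc ++ [cj])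
  else acc
termination_by (j + 1 - i).toNat
decreasing_by all_goals omega

def solve_alt (N : Int) (S : String) : String :=
  String.mk (solveLoopB S.toList 0 (S.toList.length - 1) [])

-- ===== PRECONDITION & SPEC =====
def Spec_solve (N : Int) (S : String) (out : String) : Prop := out = solve_alt N S
instance (N : Int) (S : String) (out : String) : Decidable (Spec_solve N S out) := by unfold Spec_solve; infer_instance

-- ===== CLAIM (what is proved, stated in full; the proofs are below) =====
def Claim_equal_solve : Prop := ∀ (N : Int) (S : String), Dom_solve N S → Spec_solve N S (solve N S)

-- ===== LEMMAS AND PROOFS =====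
theorem solveLoopA_step (S T : List Char) (hS : S ≠ []) :
    solveLoopA S T =
      if S.head hS < S.getLast hS then solveLoopA S.tail (T ++ [S.head hS])
      else solveLoopA S.dropLast (T ++ [S.getLast hS]) := by
  cases S with
  | nil => exact absurd rfl hS
  | cons c rest => simp only [solveLoopA, List.head_reverse, List.tail_cons, List.head_cons]

theorem solveLoopB_eq_A (l : List Char) (i j : Int) (acc : List Char)
    (h0 : 0 ≤ i) (h1 : i ≤ j + 1) (h2 : j < (l.length : Int)) :
    solveLoopB l i j acc = solveLoopA ((l.drop i.toNat).take (j + 1 - i).toNat) acc := by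
  revert h0 h1 h2
  induction i, j, acc using solveLoopB.induct l with
  | case1 i j acc h ci cj hlt ih =>
    intro h0 h1 h2
    have hia : i.toNat < l.length := by omega
    have hja : j.toNat < l.length := by omega
    have hlen : ((l.drop i.toNat).take (j + 1 - i).toNat).length = (j + 1 - i).toNat := by
      simp [List.length_take, List.length_drop]; omega
    have hne : (l.drop i.toNat).take (j + 1 - i).toNat ≠ [] := by
      intro hc; rw [hc] at hlen; simp at hlen; omega
    have hhead : ((l.drop i.toNat).take (j + 1 - i).toNat).head hne = l[i.toNat] := by
      simp [List.head_eq_getElem, List.getElem_take, List.getElem_drop]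
    have hlast : ((l.drop i.toNat).take (j + 1 - i).toNat).getLast hne = l[j.toNat] := by
      rw [List.getLast_eq_getElem]
      simp only [List.getElem_take, List.getElem_drop, hlen]
      congr 1
      omega
    have hgi : l.getD i.toNat ' ' = l[i.toNat] := List.getD_eq_getElem l ' ' hia
    have hgj : l.getD j.toNat ' ' = l[j.toNat] := List.getD_eq_getElem l ' ' hja
    rw [solveLoopB, dif_pos h]
    simp only [ci, cj, hgi, hgj] at hlt ih
    simp only [hgi, hgj]
    rw [if_pos hlt, solveLoopA_step _ _ hne, hhead, hlast, if_pos hlt]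
    rw [← List.drop_one, List.drop_take, List.drop_drop]
    have he : (j + 1 - i).toNat - 1 = (j + 1 - (i + 1)).toNat := by omega
    have he2 : i.toNat + 1 = (i + 1).toNat := by omega
    rw [he, he2]
    exact ih (by omega) (by omega) (by omega)
  | case2 i j acc h ci cj hlt ih =>
    intro h0 h1 h2
    have hia : i.toNat < l.length := by omega
    have hja : j.toNat < l.length := by omega
    have hlen : ((l.drop i.toNat).take (j + 1 - i).toNat).length = (j + 1 - i).toNat := by
      simp [List.length_take, List.length_drop]; omega
    have hne : (l.drop i.toNat).take (j + 1 - i).toNat ≠ [] := by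
      intro hc; rw [hc] at hlen; simp at hlen; omega
    have hhead : ((l.drop i.toNat).take (j + 1 - i).toNat).head hne = l[i.toNat] := by
      simp [List.head_eq_getElem, List.getElem_take, List.getElem_drop]
    have hlast : ((l.drop i.toNat).take (j + 1 - i).toNat).getLast hne = l[j.toNat] := by
      rw [List.getLast_eq_getElem]
      simp only [List.getElem_take, List.getElem_drop, hlen]
      congr 1
      omega
    have hgi : l.getD i.toNat ' ' = l[i.toNat] := List.getD_eq_getElem l ' ' hia
    have hgj : l.getD j.toNat ' ' = l[j.toNat] := List.getD_eq_getElem l ' ' hja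
    rw [solveLoopB, dif_pos h]
    simp only [ci, cj, hgi, hgj] at hlt ih
    simp only [hgi, hgj]
    rw [if_neg hlt, solveLoopA_step _ _ hne, hhead, hlast, if_neg hlt]
    rw [List.dropLast_eq_take, hlen, List.take_take]
    have he : (j + 1 - i).toNat - 1 = (j - 1 + 1 - i).toNat := by omega
    rw [Nat.min_eq_left (by omega), he]
    exact ih (by omega) (by omega) (by omega)
  | case3 i j acc h =>
    intro h0 h1 h2
    have : (j + 1 - i).toNat = 0 := by omega
    rw [solveLoopB, dif_neg h, this, List.take_zero, solveLoopA]

-- ===== VERDICT (by name: the statement is the Claim_ definition above) =====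
theorem solve_spec : Claim_equal_solve := by
  intro N S _
  unfold Spec_solve solve solve_alt
  rw [solveLoopB_eq_A _ _ _ _ (by omega) (by omega) (by omega)]
  have h1 : ((S.toList.length : Int) - 1 + 1 - 0).toNat = S.toList.length := by omega
  rw [h1, Int.toNat_zero]
  rw [List.drop_zero, List.take_length]
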